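-- pv_equiv track=rewrite | github.com/sandeepkumar09/InterviewBit | Array/maxspprod.py | maxSpecialProduct
-- ===== SOURCE A (Python) =====
-- def maxSpecialProduct(A):
-- 	maxSpecialProduct = 0
-- 	leftSpecialValue = 0
-- 	rightSpecialValue = 0
-- 	constant = 1000000007
-- 	for i in range(1,len(A)):
-- 		for j in range(i-1,-1,-1):
-- 			if A[i] < A[j]:
-- 				leftSpecialValue = j % constant
-- 				break
-- 		for k in range(i+1, len(A)):
-- 			if A[i] < A[k]:
-- 				rightSpecialValue = k % constant
-- 				break
-- 		maxSpecialProduct = max(maxSpecialProduct, (leftSpecialValue*rightSpecialValue) % constant)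
-- 		leftSpecialValue, rightSpecialValue = 0, 0
-- 	return maxSpecialProduct
-- ===== SOURCE B (Python) =====
-- def maxSpecialProduct(A):
--     MOD = 1000000007
--     n = len(A)
--     left = [0] * n
--     right = [0] * n
--     stack = []
--     for i in range(n):
--         while stack and A[stack[-1]] <= A[i]:
--             stack.pop()
--         left[i] = stack[-1] if stack else 0
--         stack.append(i)
--     stack = []
--     for i in range(n - 1, -1, -1):
--         while stack and A[stack[-1]] <= A[i]:
--             stack.pop()
--         right[i] = stack[-1] if stack else 0
--         stack.append(i)
--     best = 0
--     for i in range(n):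
--         best = max(best, left[i] * right[i] % MOD)
--     return best
-- ===== Notes on version B (the rewrite author's own statement) =====
-- stated objective: faster
-- what changed: Replaced the per-index linear scans for the nearest strictly greater element on each side by two monotonic-stack passes that compute all left/right indices in one sweep each.
import Mathlib
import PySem

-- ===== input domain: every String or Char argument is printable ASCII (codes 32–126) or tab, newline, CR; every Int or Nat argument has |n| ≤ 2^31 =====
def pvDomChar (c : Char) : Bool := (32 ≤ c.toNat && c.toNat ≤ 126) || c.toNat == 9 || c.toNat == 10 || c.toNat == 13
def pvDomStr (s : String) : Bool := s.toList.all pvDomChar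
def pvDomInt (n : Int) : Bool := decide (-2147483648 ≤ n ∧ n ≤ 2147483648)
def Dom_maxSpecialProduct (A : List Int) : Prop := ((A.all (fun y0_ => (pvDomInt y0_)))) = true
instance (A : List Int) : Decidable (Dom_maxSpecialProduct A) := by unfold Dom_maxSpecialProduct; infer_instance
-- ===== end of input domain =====

-- B replaces A's per-index O(n) nearest-greater scans by two monotonic-stack passes (O(n) total): faster (asymptotic).


-- ===== PORT A =====
-- Python's '% 1000000007' is Int.emod here: exact, since the modulus is positive (Python % agrees with emod for a positive divisor).
-- inner loop 'for j in range(i-1,-1,-1): if A[i] < A[j]: leftSpecialValue = j % c; break'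
-- (fuel m = number of indices left to scan, scanning j = m-1, m-2, …, 0; index always in range, so A[j] = getD)
def scanLeftA (A : List Int) (ai c : Int) : Nat → Int
  | 0 => 0
  | m + 1 => if ai < A.getD m 0 then (m : Int) % c else scanLeftA A ai c m

-- inner loop 'for k in range(i+1, len(A)): if A[i] < A[k]: rightSpecialValue = k % c; break'
def scanRightA (A : List Int) (ai c : Int) (k : Nat) : Int :=
  if h : k < A.length then
    (if ai < A.getD k 0 then (k : Int) % c else scanRightA A ai c (k + 1))
  else 0
termination_by A.length - k

def maxSpecialProduct (A : List Int) : Int :=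
  let c : Int := 1000000007
  (List.range' 1 (A.length - 1) 1).foldl
    (fun m i =>
      max m ((scanLeftA A (A.getD i 0) c i * scanRightA A (A.getD i 0) c (i + 1)) % c))
    0

-- ===== PORT B =====
-- 'while stack and A[stack[-1]] <= A[i]: stack.pop()'  (stack top at head)
def popLE (A : List Int) (ai : Int) : List Nat → List Nat
  | [] => []
  | t :: rest => if A.getD t 0 ≤ ai then popLE A ai rest else t :: rest

-- 'stack[-1] if stack else 0'
def topVal : List Nat → Int
  | [] => 0
  | t :: _ => (t : Int)

-- one stack pass over the given processing order, emitting the recorded index for each position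
def passB (A : List Int) : List Nat → List Nat → List Int
  | _, [] => []
  | st, i :: rest =>
    let st' := popLE A (A.getD i 0) st
    topVal st' :: passB A (i :: st') rest

def maxSpecialProduct_alt (A : List Int) : Int :=
  let c : Int := 1000000007
  let n := A.length
  let left := passB A [] (List.range n)
  let right := (passB A [] (List.range n).reverse).reverse
  (List.range n).foldl (fun best i => max best ((left.getD i 0 * right.getD i 0) % c)) 0

-- ===== PRECONDITION & SPEC =====
def Spec_maxSpecialProduct (A : List Int) (out : Int) : Prop := out = maxSpecialProduct_alt A
instance (A : List Int) (out : Int) : Decidable (Spec_maxSpecialProduct A out) := by unfold Spec_maxSpecialProduct; infer_instance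

-- ===== CLAIM (what is proved, stated in full; the proofs are below) =====
def Claim_equal_maxSpecialProduct : Prop := ∀ (A : List Int), Dom_maxSpecialProduct A → Spec_maxSpecialProduct A (maxSpecialProduct A)

-- ===== LEMMAS AND PROOFS =====

-- common spec: first index q in P (most recent first) whose value exceeds ai, else 0
def pg (A : List Int) (ai : Int) (P : List Nat) : Int :=
  match P.find? (fun q => decide (ai < A.getD q 0)) with
  | some q => (q : Int)
  | none => 0

-- the stack after processing P (most recent first)
def buildStack (A : List Int) : List Nat → List Nat
  | [] => []
  | q :: P => q :: popLE A (A.getD q 0) (buildStack A P)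

lemma popLE_cons (A : List Int) (ai : Int) (t : Nat) (rest : List Nat) :
    popLE A ai (t :: rest) = if A.getD t 0 ≤ ai then popLE A ai rest else t :: rest := rfl

lemma pg_cons_pos (A : List Int) {ai : Int} {q : Nat} (P : List Nat) (h : ai < A.getD q 0) :
    pg A ai (q :: P) = (q : Int) := by
  unfold pg
  rw [List.find?_cons, decide_eq_true h]

lemma pg_cons_neg (A : List Int) {ai : Int} {q : Nat} (P : List Nat) (h : ¬ ai < A.getD q 0) :
    pg A ai (q :: P) = pg A ai P := by
  unfold pg
  rw [List.find?_cons, decide_eq_false h]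

lemma popLE_popLE (A : List Int) {a b : Int} (h : b ≤ a) (st : List Nat) :
    popLE A a (popLE A b st) = popLE A a st := by
  induction st with
  | nil => rfl
  | cons t rest ih =>
    by_cases hb : A.getD t 0 ≤ b
    · rw [popLE_cons, if_pos hb, ih, popLE_cons, if_pos (hb.trans h)]
    · rw [popLE_cons A b, if_neg hb]

lemma topVal_popLE_buildStack (A : List Int) (ai : Int) (P : List Nat) :
    topVal (popLE A ai (buildStack A P)) = pg A ai P := by
  induction P with
  | nil => rfl
  | cons q P ih =>
    by_cases hq : A.getD q 0 ≤ ai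
    · rw [buildStack, popLE_cons, if_pos hq, popLE_popLE A hq, ih,
        pg_cons_neg A P (not_lt.mpr hq)]
    · rw [buildStack, popLE_cons, if_neg hq, pg_cons_pos A P (lt_of_not_ge hq)]
      rfl

-- passB from the stack of processed P equals the pure spec pass
def pgList (A : List Int) : List Nat → List Nat → List Int
  | _, [] => []
  | P, i :: rest => pg A (A.getD i 0) P :: pgList A (i :: P) rest

lemma passB_eq_pgList (A : List Int) (order : List Nat) : ∀ P : List Nat,
    passB A (buildStack A P) order = pgList A P order := by
  induction order with
  | nil => intro P; rfl
  | cons i rest ih =>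
    intro P
    have hstep : (i :: popLE A (A.getD i 0) (buildStack A P)) = buildStack A (i :: P) := rfl
    simp only [passB, pgList, topVal_popLE_buildStack, hstep, ih (i :: P)]

lemma pgList_getD (A : List Int) : ∀ (order P : List Nat) (m : Nat), m < order.length →
    (pgList A P order).getD m 0 =
      pg A (A.getD (order.getD m 0) 0) ((order.take m).reverse ++ P) := by
  intro order
  induction order with
  | nil => intro P m h; simp at h
  | cons i rest ih =>
    intro P m h
    cases m with
    | zero => simp [pgList]
    | succ m =>
      have := ih (i :: P) m (by simpa using h)
      simpa [pgList, List.take_succ_cons, List.reverse_cons, List.append_assoc] using this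

-- length of the spec pass output
lemma pgList_length (A : List Int) : ∀ (order P : List Nat), (pgList A P order).length = order.length := by
  intro order
  induction order with
  | nil => intro P; rfl
  | cons i rest ih => intro P; simp [pgList, ih]

-- A's left scan equals pg over [m-1, …, 0]
lemma scanLeftA_eq (A : List Int) (ai c : Int) : ∀ m : Nat,
    scanLeftA A ai c m = pg A ai ((List.range m).reverse) % c := by
  intro m
  induction m with
  | zero => simp [scanLeftA, pg]
  | succ m ih =>
    rw [List.range_succ, List.reverse_append, List.reverse_singleton, List.singleton_append]
    by_cases h : ai < A.getD m 0
    · rw [scanLeftA, if_pos h, pg_cons_pos A _ h]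
    · rw [scanLeftA, if_neg h, pg_cons_neg A _ h, ih]

-- A's right scan equals pg over [k, …, n-1]
lemma scanRightA_eq (A : List Int) (ai c : Int) : ∀ m k : Nat, m = A.length - k →
    scanRightA A ai c k = pg A ai (List.range' k (A.length - k) 1) % c := by
  intro m
  induction m with
  | zero =>
    intro k hk
    have hnk : ¬ k < A.length := by omega
    rw [scanRightA]
    simp [hnk, ← hk, pg]
  | succ m ih =>
    intro k hk
    have hkl : k < A.length := by omega
    have hr : A.length - k = (A.length - (k + 1)) + 1 := by omega
    rw [scanRightA]
    simp only [hkl, dif_pos]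
    rw [hr, List.range'_succ]
    by_cases h : ai < A.getD k 0
    · rw [if_pos h, pg_cons_pos A _ h]
    · rw [if_neg h, ih (k + 1) (by omega), pg_cons_neg A _ h]

-- (l % c) * (r % c) % c = l * r % c
lemma mul_emod_emod (l r c : Int) : (l % c * (r % c)) % c = (l * r) % c :=
  (Int.mul_emod l r c).symm

-- the processed prefix of the reversed range, reversed back, is a contiguous range'
lemma take_reverse_range (n m : Nat) (h : m ≤ n) :
    (((List.range n).reverse.take m).reverse) = List.range' (n - m) m 1 := by
  have h1 : (List.range n).reverse.take m = ((List.range n).drop (n - m)).reverse := by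
    rw [List.take_reverse]
    simp [List.length_range]
  rw [h1, List.reverse_reverse, List.range_eq_range', List.drop_range']
  simp [Nat.sub_sub_self h]

-- element of the reversed range
lemma reverse_range_getD (n m : Nat) (h : m < n) :
    ((List.range n).reverse.getD m 0) = n - 1 - m := by
  have hlt : m < (List.range n).reverse.length := by simpa using h
  rw [List.getD_eq_getElem _ _ hlt]
  simp [List.getElem_reverse]

-- B's stored left value at index i
lemma left_getD (A : List Int) (i : Nat) (h : i < A.length) :
    (passB A [] (List.range A.length)).getD i 0
      = pg A (A.getD i 0) ((List.range i).reverse) := by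
  have h0 : passB A [] (List.range A.length) = pgList A [] (List.range A.length) :=
    passB_eq_pgList A (List.range A.length) []
  rw [h0, pgList_getD A (List.range A.length) [] i (by simpa using h)]
  simp [List.take_range, h, Nat.min_eq_left h.le]

-- B's stored right value at index i
lemma right_getD (A : List Int) (i : Nat) (h : i < A.length) :
    ((passB A [] (List.range A.length).reverse).reverse).getD i 0
      = pg A (A.getD i 0) (List.range' (i + 1) (A.length - (i + 1)) 1) := by
  set n := A.length with hn
  have h0 : passB A [] (List.range n).reverse = pgList A [] (List.range n).reverse :=
    passB_eq_pgList A _ []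
  have hlen : (pgList A [] (List.range n).reverse).length = n := by
    simp [pgList_length]
  have hrev : ((pgList A [] (List.range n).reverse).reverse).getD i 0
      = (pgList A [] (List.range n).reverse).getD (n - 1 - i) 0 := by
    have hi : i < (pgList A [] (List.range n).reverse).reverse.length := by simpa [hlen] using h
    rw [List.getD_eq_getElem _ _ hi, List.getElem_reverse,
      List.getD_eq_getElem _ _ (by simp [hlen]; omega)]
    congr 1
    simp [hlen]
  rw [h0, hrev, pgList_getD A _ [] (n - 1 - i) (by simp; omega)]
  rw [reverse_range_getD n (n - 1 - i) (by omega)]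
  have hieq : n - 1 - (n - 1 - i) = i := by omega
  rw [hieq, take_reverse_range n (n - 1 - i) (by omega)]
  have : n - (n - 1 - i) = i + 1 := by omega
  rw [this]
  have : n - 1 - i = n - (i + 1) := by omega
  simp [this]

-- ===== VERDICT (by name: the statement is the Claim_ definition above) =====
theorem maxSpecialProduct_spec : Claim_equal_maxSpecialProduct := by
  intro A _
  unfold Spec_maxSpecialProduct
  simp only [maxSpecialProduct, maxSpecialProduct_alt]
  rcases Nat.eq_zero_or_pos A.length with h0 | hpos
  · simp [h0]
  -- peel off i = 0 from B's fold: its term is 0 since left[0] = 0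
  have hrange : List.range A.length = 0 :: List.range' 1 (A.length - 1) 1 := by
    rw [List.range_eq_range']
    conv_lhs => rw [show A.length = (A.length - 1) + 1 by omega]
    rw [List.range'_succ]
  set L := passB A [] (List.range A.length) with hLdef
  set R := (passB A [] (List.range A.length).reverse).reverse with hRdef
  rw [hrange, List.foldl_cons]
  have hL0 : L.getD 0 0 = 0 := by
    rw [hLdef, left_getD A 0 hpos]
    simp [pg]
  rw [hL0]
  simp only [zero_mul, Int.zero_emod, max_self]
  -- the remaining folds agree pointwise on [1, ..., n-1]
  refine List.foldl_ext _ _ 0 ?_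
  intro b i hi
  rcases List.mem_range'_1.mp hi with ⟨hi1, hi2⟩
  have hiA : i < A.length := by omega
  rw [scanLeftA_eq, scanRightA_eq A _ _ (A.length - (i + 1)) (i + 1) rfl,
    hLdef, hRdef, left_getD A i hiA, right_getD A i hiA, mul_emod_emod]
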